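-- pv_equiv track=rewrite | github.com/indbinfo/langchain_proto | web_main/src/preprocess/qdrant.py | remove_overlaps_in_sequence
-- ===== SOURCE A (Python) =====
-- def remove_overlaps_in_sequence(texts):
--     """
--     주어진 텍스트 리스트에서 겹치는 부분을 제거한 후 합친 텍스트를 반환
--
--     Args:
--         texts (list): 겹치는 부분을 제거하고 합칠 텍스트 리스트
--
--     Returns:
--         str: 겹치는 부분이 제거된 후 합쳐진 텍스트
--     """
--     if not texts:
--         return ""
--
--     merged_text = texts[0]
--
--     for next_text in texts[1:]:
--         min_length = min(len(merged_text), len(next_text))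
--         for i in range(min_length, 0, -1):
--             # merged_text와 next_text의 겹치는 부분을 제외하고 연결
--             if merged_text.endswith(next_text[:i]):
--                 merged_text += next_text[i:]
--                 break
--         else:
--             merged_text += next_text
--
--     return merged_text
-- ===== SOURCE B (Python) =====
-- def remove_overlaps_in_sequence(texts):
--     """Merge texts dropping the longest suffix/prefix overlap at each join.
--
--     Instead of testing every overlap length with endswith, scan the tail of the
--     merged text for occurrences of the next text's first character (str.find)
--     and compare the remaining suffix once per anchor position.
--     """
--     if not texts:
--         return ""
--
--     merged = texts[0]
--
--     for nxt in texts[1:]: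
--         ov = 0
--         if nxt:
--             start = max(len(merged) - len(nxt), 0)
--             p = merged.find(nxt[0], start)
--             while p != -1:
--                 if nxt.startswith(merged[p:]):
--                     ov = len(merged) - p
--                     break
--                 p = merged.find(nxt[0], p + 1)
--         merged += nxt[ov:]
--
--     return merged
-- ===== Notes on version B (the rewrite author's own statement) =====
-- stated objective: alternative
-- what changed: A tries every overlap length from min(len) down with an endswith test per length; B scans candidate join positions left-to-right, jumping between occurrences of the next text's first character via str.find and doing one suffix/prefix comparison per anchor position.
import Mathlib
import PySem

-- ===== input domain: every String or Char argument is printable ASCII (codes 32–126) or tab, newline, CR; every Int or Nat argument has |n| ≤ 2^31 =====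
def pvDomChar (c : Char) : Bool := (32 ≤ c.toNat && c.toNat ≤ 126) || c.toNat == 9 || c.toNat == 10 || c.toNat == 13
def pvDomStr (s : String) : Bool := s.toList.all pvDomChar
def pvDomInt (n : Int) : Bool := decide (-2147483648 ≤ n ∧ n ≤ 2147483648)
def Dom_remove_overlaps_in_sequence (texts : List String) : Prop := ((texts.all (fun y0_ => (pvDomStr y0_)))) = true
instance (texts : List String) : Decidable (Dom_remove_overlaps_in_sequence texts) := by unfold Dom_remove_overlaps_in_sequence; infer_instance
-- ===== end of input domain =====

-- B replaces A's per-merge countdown over all overlap lengths (one endswith test each) by a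
-- left-to-right scan over occurrences of the next text's first character (str.find) with one
-- suffix/prefix comparison per occurrence (an alternative algorithm; return values proved equal).

-- ===== PORT A =====
-- inner loop 'for i in range(min_length, 0, -1): if merged.endswith(next[:i]): merged += next[i:]; break'
-- with the for-else appending all of next when no i matches
def pvAScan (m n : List Char) : List Int → List Char
  | [] => m ++ n
  | i :: is =>
    if PySem.Chars.endswith m (PySem.List.slice n none (some i)) then
      m ++ PySem.List.slice n (some i) none
    else pvAScan m n is

def pvAMerge (m n : List Char) : List Char :=
  pvAScan m n (PySem.List.pyRange (↑(min m.length n.length)) 0 (-1))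

def remove_overlaps_in_sequence (texts : List String) : String :=
  match texts with
  | [] => ""
  | t :: rest => String.ofList (rest.foldl (fun m n => pvAMerge m n.toList) t.toList)

-- ===== PORT B =====
-- 'while p != -1: if nxt.startswith(merged[p:]): ov = len(merged)-p; break; p = merged.find(nxt[0], p+1)'
-- fuel only makes the while-loop total (p strictly increases, bounded by len(merged)); merged[p:] with
-- the nonnegative find result p is exactly List.drop p.toNat
def pvBLoop (m n : List Char) (c0 : Char) : Nat → Int → Nat
  | 0, _ => 0
  | fuel+1, p =>
    if p = -1 then 0
    else if PySem.Chars.startswith n (m.drop p.toNat) then m.length - p.toNat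
    else pvBLoop m n c0 fuel (PySem.Chars.findFrom m [c0] (p+1) none)

def pvBMerge (m n : List Char) : List Char :=
  match n with
  | [] => m ++ n.drop 0   -- ov stays 0 when nxt is empty
  | c0 :: _ =>
    -- 'start = max(len(merged) - len(nxt), 0)': Nat subtraction clamps exactly like max(…, 0)
    let start : Nat := m.length - n.length
    let ov := pvBLoop m n c0 (m.length + 1) (PySem.Chars.findFrom m [c0] (↑start) none)
    m ++ n.drop ov

def remove_overlaps_in_sequence_alt (texts : List String) : String :=
  match texts with
  | [] => ""
  | t :: rest => String.ofList (rest.foldl (fun m n => pvBMerge m n.toList) t.toList)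

-- ===== PRECONDITION & SPEC =====
def Spec_remove_overlaps_in_sequence (texts : List String) (out : String) : Prop := out = remove_overlaps_in_sequence_alt texts
instance (texts : List String) (out : String) : Decidable (Spec_remove_overlaps_in_sequence texts out) := by unfold Spec_remove_overlaps_in_sequence; infer_instance

-- ===== CLAIM (what is proved, stated in full; the proofs are below) =====
def Claim_equal_remove_overlaps_in_sequence : Prop := ∀ (texts : List String), Dom_remove_overlaps_in_sequence texts → Spec_remove_overlaps_in_sequence texts (remove_overlaps_in_sequence texts)

-- ===== LEMMAS AND PROOFS =====
lemma pvPyRange_desc (k : Nat) :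
    PySem.List.pyRange (↑k) 0 (-1) = (List.range k).map (fun (j : Nat) => (k : Int) - (j : Int)) := by
  simp only [PySem.List.pyRange]
  rcases Nat.eq_zero_or_pos k with h | h
  · subst h; simp
  · rw [if_neg (by norm_num), if_neg (by norm_num), if_pos (by exact_mod_cast h)]
    have h1 : ((k:Int) - 0 + - -1 - 1) / - -1 = (k : Int) := by norm_num
    rw [h1, Int.toNat_natCast]
    apply List.map_congr_left
    intro j hj
    ring

lemma pvPyRange_desc_succ (k : Nat) :
    PySem.List.pyRange (↑(k+1)) 0 (-1) = ((k:Int)+1) :: PySem.List.pyRange (↑k) 0 (-1) := by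
  rw [pvPyRange_desc, pvPyRange_desc, List.range_succ_eq_map, List.map_cons, List.map_map]
  refine congrArg₂ _ (by push_cast; ring) ?_
  apply List.map_congr_left
  intro j hj
  simp [Function.comp]

lemma pvSingleton_prefix_drop (l : List Char) (q : Nat) (c : Char) :
    [c] <+: l.drop q ↔ l[q]? = some c := by
  constructor
  · rintro ⟨t, ht⟩
    have h0 : (l.drop q)[0]? = some c := by rw [← ht]; simp
    simpa using h0
  · intro h
    have hq : q < l.length := (List.getElem?_eq_some_iff.mp h).1
    refine ⟨l.drop (q+1), ?_⟩
    have := List.getElem_cons_drop (as := l) (i := q) hq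
    simp only [List.getElem?_eq_some_iff] at h
    obtain ⟨h1, h2⟩ := h
    rw [← this, h2]
    rfl

def pvOvA (m n : List Char) : Nat → Nat
  | 0 => 0
  | k+1 => if n.take (k+1) <:+ m then k+1 else pvOvA m n k

def pvOvScan (m n : List Char) (c0 : Char) (k : Nat) : Nat :=
  if h : k < m.length then
    if m.drop k <+: n ∧ m[k]? = some c0 then m.length - k else pvOvScan m n c0 (k+1)
  else 0
termination_by m.length - k

lemma pvAScan_eq (m n : List Char) :
    ∀ k, k ≤ min m.length n.length →
      pvAScan m n (PySem.List.pyRange (↑k) 0 (-1)) = m ++ n.drop (pvOvA m n k) := by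
  intro k
  induction k with
  | zero => intro _; simp [pvAScan, pvOvA, PySem.List.pyRange]
  | succ k ih =>
    intro hk
    rw [pvPyRange_desc_succ, pvAScan]
    have hsl : PySem.List.slice n none (some ((k:Int)+1)) = n.take (k+1) := by
      rw [PySem.List.slice_to n (by omega)]
      norm_num
    rw [hsl]
    by_cases h : n.take (k+1) <:+ m
    · rw [if_pos (by simpa [PySem.Chars.endswith_iff] using h)]
      rw [PySem.List.slice_from n (by omega : (0:Int) ≤ (k:Int)+1)]
      have he : pvOvA m n (k+1) = k+1 := by
        have : pvOvA m n (k+1) = if n.take (k+1) <:+ m then k+1 else pvOvA m n k := rfl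
        rw [this, if_pos h]
      rw [he]
      norm_num
    · rw [if_neg (by simpa [PySem.Chars.endswith_iff] using h)]
      have he : pvOvA m n (k+1) = pvOvA m n k := by
        have : pvOvA m n (k+1) = if n.take (k+1) <:+ m then k+1 else pvOvA m n k := rfl
        rw [this, if_neg h]
      rw [he, ih (by omega)]

lemma pvOvScan_zero (m n : List Char) (c0 : Char) :
    ∀ k, (∀ q, k ≤ q → m[q]? ≠ some c0) → pvOvScan m n c0 k = 0 := by
  have main : ∀ d k, m.length - k ≤ d → (∀ q, k ≤ q → m[q]? ≠ some c0) →
      pvOvScan m n c0 k = 0 := by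
    intro d
    induction d with
    | zero =>
      intro k hd _
      rw [pvOvScan, dif_neg (by omega)]
    | succ d ih =>
      intro k hd H
      rw [pvOvScan]
      split
      · rw [if_neg (by intro hc; exact H k le_rfl hc.2)]
        exact ih (k+1) (by omega) (fun q hq => H q (by omega))
      · rfl
  exact fun k => main (m.length - k) k le_rfl

lemma pvOvScan_skip (m n : List Char) (c0 : Char) :
    ∀ d p k, p - k ≤ d → k ≤ p → p ≤ m.length →
      (∀ q, k ≤ q → q < p → m[q]? ≠ some c0) →
      pvOvScan m n c0 k = pvOvScan m n c0 p := by
  intro d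
  induction d with
  | zero =>
    intro p k hd hkp _ _
    have : k = p := by omega
    rw [this]
  | succ d ih =>
    intro p k hd hkp hp H
    rcases Nat.eq_or_lt_of_le hkp with h | h
    · rw [h]
    · rw [pvOvScan, dif_pos (by omega),
        if_neg (by intro hc; exact H k le_rfl h hc.2)]
      exact ih p (k+1) (by omega) (by omega) hp (fun q hq => H q (by omega))

lemma pvBLoop_eq_scan (m n : List Char) (c0 : Char) :
    ∀ fuel k, k ≤ m.length → m.length + 1 - k ≤ fuel →
      pvBLoop m n c0 fuel (PySem.Chars.findFrom m [c0] (↑k) none) = pvOvScan m n c0 k := by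
  intro fuel
  induction fuel with
  | zero => intro k hk hf; omega
  | succ fuel ih =>
    intro k hk hf
    have hunf : ∀ p, pvBLoop m n c0 (fuel+1) p =
        if p = -1 then 0
        else if PySem.Chars.startswith n (m.drop p.toNat) then m.length - p.toNat
        else pvBLoop m n c0 fuel (PySem.Chars.findFrom m [c0] (p+1) none) := fun _ => rfl
    by_cases hr : PySem.Chars.findFrom m [c0] (↑k) none = -1
    · rw [hunf, if_pos hr]
      symm
      apply pvOvScan_zero
      have hni := (PySem.Chars.findFrom_natCast_eq_neg_one_iff m [c0] k hk).mp hr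
      rw [List.singleton_infix_iff] at hni
      intro q hq hcq
      apply hni
      have hdq : (m.drop k)[q - k]? = some c0 := by
        rw [List.getElem?_drop, Nat.add_sub_cancel' hq]; exact hcq
      exact List.mem_of_getElem? hdq
    · obtain ⟨hkr, hpre, hmin⟩ := PySem.Chars.findFrom_natCast_spec m [c0] k hk hr
      set r := PySem.Chars.findFrom m [c0] (↑k) none with hrdef
      have hr0 : 0 ≤ r := le_trans (by positivity) hkr
      have hrp : r = ↑r.toNat := (Int.toNat_of_nonneg hr0).symm
      set p := r.toNat with hpdef
      have hpc : m[p]? = some c0 := (pvSingleton_prefix_drop m p c0).mp hpre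
      have hpl : p < m.length := (List.getElem?_eq_some_iff.mp hpc).1
      have hkp : k ≤ p := by omega
      have hskip : pvOvScan m n c0 k = pvOvScan m n c0 p :=
        pvOvScan_skip m n c0 (p - k) p k le_rfl hkp (le_of_lt hpl)
          (fun q hq hql hcq => hmin q hq hql ((pvSingleton_prefix_drop m q c0).mpr hcq))
      rw [hunf, if_neg hr]
      by_cases hs : PySem.Chars.startswith n (m.drop r.toNat) = true
      · rw [if_pos hs, hskip, pvOvScan, dif_pos hpl,
          if_pos ⟨(PySem.Chars.startswith_iff n (m.drop p)).mp hs, hpc⟩]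
      · rw [if_neg hs]
        have hstep : r + 1 = ((p + 1 : Nat) : Int) := by omega
        have hps : pvOvScan m n c0 p = pvOvScan m n c0 (p+1) := by
          rw [pvOvScan, dif_pos hpl,
            if_neg (fun hc => hs ((PySem.Chars.startswith_iff n (m.drop p)).mpr hc.1))]
        rw [hstep, ih (p+1) (by omega) (by omega), hskip, hps]

lemma pvOvScan_eq_ovA (m : List Char) (c0 : Char) (rest : List Char) :
    ∀ j, j ≤ min m.length (c0 :: rest).length →
      pvOvScan m (c0 :: rest) c0 (m.length - j) = pvOvA m (c0 :: rest) j := by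
  intro j
  induction j with
  | zero =>
    intro _
    rw [Nat.sub_zero, pvOvScan, dif_neg (by omega)]
    rfl
  | succ j ih =>
    intro hj
    set n := c0 :: rest with hn
    set k := m.length - (j+1) with hkdef
    have hjm : j + 1 ≤ m.length := le_trans hj (min_le_left _ _)
    have hjn : j + 1 ≤ n.length := le_trans hj (min_le_right _ _)
    have hkl : k < m.length := by omega
    have hlen_drop : (m.drop k).length = j + 1 := by rw [List.length_drop]; omega
    have hiff : (m.drop k <+: n ∧ m[k]? = some c0) ↔ n.take (j+1) <:+ m := by
      constructor
      · rintro ⟨h1, _⟩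
        have heq := List.prefix_iff_eq_take.mp h1
        rw [hlen_drop] at heq
        rw [← heq]
        exact List.drop_suffix k m
      · intro hP
        have hlt : (n.take (j+1)).length = j + 1 := by
          rw [List.length_take]; omega
        have heq := List.suffix_iff_eq_drop.mp hP
        rw [hlt] at heq
        refine ⟨?_, ?_⟩
        · rw [← hkdef] at heq
          rw [← heq]
          exact List.take_prefix _ _
        · apply (pvSingleton_prefix_drop m k c0).mp
          rw [← hkdef] at heq
          rw [← heq, hn, List.take_succ_cons]
          exact ⟨rest.take j, rfl⟩
    have hova : pvOvA m n (j+1) = if n.take (j+1) <:+ m then j+1 else pvOvA m n j := rfl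
    rw [pvOvScan, dif_pos hkl, hova]
    by_cases hP : n.take (j+1) <:+ m
    · rw [if_pos (hiff.mpr hP), if_pos hP]
      omega
    · rw [if_neg (fun hC => hP (hiff.mp hC)), if_neg hP]
      have hk1 : k + 1 = m.length - j := by omega
      rw [hk1]
      exact ih (by omega)

lemma pvMerge_eq (m n : List Char) : pvAMerge m n = pvBMerge m n := by
  cases n with
  | nil => simp [pvAMerge, pvBMerge, pvAScan, PySem.List.pyRange]
  | cons c0 rest =>
    have hA := pvAScan_eq m (c0 :: rest) (min m.length (c0 :: rest).length) le_rfl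
    have hstart : m.length - (c0 :: rest).length = m.length - min m.length (c0 :: rest).length := by
      omega
    have hB : pvBMerge m (c0 :: rest)
        = m ++ (c0 :: rest).drop
            (pvBLoop m (c0 :: rest) c0 (m.length + 1)
              (PySem.Chars.findFrom m [c0] (↑(m.length - (c0 :: rest).length)) none)) := rfl
    rw [pvAMerge, hA, hB, hstart,
      pvBLoop_eq_scan m (c0 :: rest) c0 (m.length + 1)
        (m.length - min m.length (c0 :: rest).length) (by omega) (by omega),
      pvOvScan_eq_ovA m c0 rest (min m.length (c0 :: rest).length) le_rfl]

-- ===== VERDICT (by name: the statement is the Claim_ definition above) =====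
theorem remove_overlaps_in_sequence_spec : Claim_equal_remove_overlaps_in_sequence := by
  intro texts _
  unfold Spec_remove_overlaps_in_sequence remove_overlaps_in_sequence remove_overlaps_in_sequence_alt
  cases texts with
  | nil => rfl
  | cons t rest =>
    have : (fun (m : List Char) (n : String) => pvAMerge m n.toList)
         = (fun (m : List Char) (n : String) => pvBMerge m n.toList) := by
      funext m n; exact pvMerge_eq m n.toList
    simp [this]
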